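-- pv_equiv track=rewrite | github.com/pradyGn/Markov-Decision-Process-MDP- | mdp.py | makelst
-- ===== SOURCE A (Python) =====
-- def getspc(l):
--     spc = []
--     for j in range(len(l)):
--         if l[j] == ' ':
--             spc.append(j)
--     return spc
--
-- def makelst(l):
--     ret = []
--     final = []
--     spc = getspc(l)
--     spc.append(len(l))
--     for i in range(1, len(spc)):
--         ret.append(l[spc[i-1]+1:spc[i]])
--
--     nope = ",[]"
--     for ele in ret:
--         for character in nope:
--             ele = ele.replace(character, "")
--         final.append(ele)
--
--     return final
-- ===== SOURCE B (Python) =====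
-- def makelst(l):
--     # single pass: build tokens char by char, flush at each space, skip comma/bracket chars,
--     # drop the field before the first space
--     out = []
--     cur = ''
--     for ch in l:
--         if ch == ' ':
--             out.append(cur)
--             cur = ''
--         elif ch not in ',[]':
--             cur = cur + ch
--     out.append(cur)
--     return out[1:]
-- ===== Notes on version B (the rewrite author's own statement) =====
-- stated objective: simpler
-- what changed: Replaces A's three passes (build a list of space positions, slice between consecutive positions, then strip comma and bracket characters from each field with repeated str.replace) by one left-to-right pass over the characters that builds each token directly, skipping comma/bracket characters, flushing at each space, and dropping the field before the first space.
import Mathlib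
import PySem

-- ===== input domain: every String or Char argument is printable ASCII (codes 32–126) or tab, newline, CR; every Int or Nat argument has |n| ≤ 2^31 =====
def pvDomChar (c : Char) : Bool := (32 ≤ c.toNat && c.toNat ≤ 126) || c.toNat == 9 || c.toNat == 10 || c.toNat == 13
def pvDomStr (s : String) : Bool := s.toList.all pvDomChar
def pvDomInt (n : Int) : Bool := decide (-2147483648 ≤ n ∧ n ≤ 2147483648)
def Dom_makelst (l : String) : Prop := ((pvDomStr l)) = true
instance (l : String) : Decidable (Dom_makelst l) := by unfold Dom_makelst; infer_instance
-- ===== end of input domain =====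

-- B replaces A's three passes (space-position index, slice loop, replace loop) by one
-- character-level pass with an accumulator; objective: simpler (same asymptotic cost).

-- ===== PORT A =====
def getspc (l : String) : List Int :=
  (PySem.List.pyRange 0 (PySem.Str.len l) 1).foldl
    (fun spc j => if PySem.Str.pyGet? l j == some ' ' then spc ++ [j] else spc) []

def makelst (l : String) : List String :=
  let spc := getspc l ++ [PySem.Str.len l]
  let ret := (PySem.List.pyRange 1 (PySem.List.len spc) 1).foldl
      (fun ret i => ret ++ [PySem.List.slice l.toList
        (some (PySem.List.pyGetD spc (i - 1) 0 + 1)) (some (PySem.List.pyGetD spc i 0))])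
      ([] : List (List Char))
  let final := ret.foldl (fun final ele =>
      final ++ [(",[]".toList).foldl (fun e c => PySem.Chars.replace e [c] []) ele]) []
  final.map String.ofList

-- ===== PORT B =====
-- one pass; Python's membership test of the single character ch in the 3-char strip set
-- is ported as the three comparisons (exact for a 1-character ch)
def makelst_alt (l : String) : List String :=
  let p := l.toList.foldl
    (fun (st : List String × List Char) ch =>
      if ch == ' ' then (st.1 ++ [String.ofList st.2], [])
      else if !(ch == ',' || ch == '[' || ch == ']') then (st.1, st.2 ++ [ch])
      else st)
    ([], [])
  (p.1 ++ [String.ofList p.2]).tail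

-- ===== PRECONDITION & SPEC =====
def Spec_makelst (l : String) (out : List String) : Prop := out = makelst_alt l
instance (l : String) (out : List String) : Decidable (Spec_makelst l out) := by unfold Spec_makelst; infer_instance

-- ===== CLAIM (what is proved, stated in full; the proofs are below) =====
def Claim_equal_makelst : Prop := ∀ (l : String), Dom_makelst l → Spec_makelst l (makelst l)

-- ===== LEMMAS AND PROOFS =====

/-- strip the characters `,[]` -/
def cleanCs (cs : List Char) : List Char :=
  cs.filter (fun c => !(c == ',' || c == '[' || c == ']'))

/-- reference split on a single space character (the `'a b'.split(' ')` shape) -/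
def sp : List Char → List (List Char)
  | [] => [[]]
  | c :: r =>
    if c = ' ' then [] :: sp r
    else
      match sp r with
      | [] => [[c]]
      | t :: ts => (c :: t) :: ts

/-- positions of the spaces in a character list -/
def posR : List Char → List Nat
  | [] => []
  | c :: r => (if c = ' ' then [0] else []) ++ (posR r).map (· + 1)

/-- the slice of `cs` strictly between positions `a` and `b` -/
def segN (cs : List Char) (a b : Nat) : List Char := (cs.drop (a + 1)).take (b - (a + 1))

/-- slices between consecutive entries of a position list -/
def chainN (cs : List Char) : List Nat → List (List Char)
  | a :: b :: t => segN cs a b :: chainN cs (b :: t)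
  | _ => []

/-- B's loop body, named for the proofs -/
def bstep (st : List String × List Char) (ch : Char) : List String × List Char :=
  if ch == ' ' then (st.1 ++ [String.ofList st.2], [])
  else if !(ch == ',' || ch == '[' || ch == ']') then (st.1, st.2 ++ [ch])
  else st

theorem bstep_eq :
    (fun (st : List String × List Char) ch =>
      if ch == ' ' then (st.1 ++ [String.ofList st.2], [])
      else if !(ch == ',' || ch == '[' || ch == ']') then (st.1, st.2 ++ [ch])
      else st) = bstep := rfl

theorem sp_ne_nil (cs : List Char) : sp cs ≠ [] := by
  cases cs with
  | nil => simp [sp]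
  | cons c r =>
    simp only [sp]
    split
    · simp
    · split <;> simp

theorem replace_go_single (c : Char) :
    ∀ (fuel : Nat) (l acc : List Char), l.length ≤ fuel →
      PySem.Chars.replace.go [c] [] fuel l acc = acc.reverse ++ l.filter (· != c) := by
  intro fuel
  induction fuel with
  | zero => intro l acc h; cases l <;> simp_all [PySem.Chars.replace.go]
  | succ n ih =>
    intro l acc h
    cases l with
    | nil => simp [PySem.Chars.replace.go]
    | cons x t =>
      simp only [PySem.Chars.replace.go]
      by_cases hx : c = x
      · subst hx
        rw [if_pos (by simp [List.isPrefixOf])]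
        rw [ih _ _ (by simpa using Nat.le_of_succ_le_succ (by simpa using h))]
        simp
      · rw [if_neg (by simp [List.isPrefixOf, hx])]
        rw [ih _ _ (by simpa using h)]
        simp [Ne.symm hx]

theorem replace_single (c : Char) (cs : List Char) :
    PySem.Chars.replace cs [c] [] = cs.filter (· != c) := by
  rw [PySem.Chars.replace]
  simp [replace_go_single c cs.length cs [] le_rfl]

theorem clean_filters (ele : List Char) :
    ((ele.filter (· != ',')).filter (· != '[')).filter (· != ']') = cleanCs ele := by
  rw [List.filter_filter, List.filter_filter]
  apply List.filter_congr
  intro a _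
  simp only [cleanCs, bne, Bool.not_or]
  ac_rfl

theorem posR_eq (cs : List Char) :
    (List.range cs.length).filter (fun j => cs[j]? == some ' ') = posR cs := by
  induction cs with
  | nil => simp [posR]
  | cons c r ih =>
    simp only [posR, List.length_cons, List.range_succ_eq_map]
    rw [List.filter_cons]
    by_cases hc : c = ' '
    · simp [hc, List.filter_map, ← ih, Function.comp_def]
    · simp [hc, List.filter_map, ← ih, Function.comp_def]

theorem getspc_eq (l : String) :
    getspc l = (posR l.toList).map (fun k : Nat => (k : Int)) := by
  unfold getspc
  rw [PySem.Str.len_eq, PySem.List.pyRange_zero_natCast]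
  rw [show (fun (spc : List Int) j => if PySem.Str.pyGet? l j == some ' ' then spc ++ [j] else spc)
      = (fun spc j => if (PySem.Str.pyGet? l j == some ' ') = true then spc ++ [id j] else spc) by
    funext spc j; simp]
  rw [PySem.List.foldl_append_if (fun j => PySem.Str.pyGet? l j == some ' ') id]
  simp only [List.nil_append, List.map_id]
  rw [List.filter_map]
  rw [← posR_eq l.toList]
  congr 1
  apply List.filter_congr
  intro k _
  simp

theorem chainN_shift (c : Char) (cs : List Char) :
    ∀ ns : List Nat, chainN (c :: cs) (ns.map (· + 1)) = chainN cs ns := by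
  intro ns
  induction ns with
  | nil => simp [chainN]
  | cons a t ih =>
    cases t with
    | nil => simp [chainN]
    | cons b t' =>
      simp only [List.map_cons, chainN] at ih ⊢
      rw [ih]
      simp [segN]

theorem idx_chain (cs : List Char) :
    ∀ ns : List Nat,
      (List.range (ns.length - 1)).map (fun k => segN cs (ns.getD k 0) (ns.getD (k + 1) 0))
        = chainN cs ns := by
  intro ns
  induction ns with
  | nil => simp [chainN]
  | cons a t ih =>
    cases t with
    | nil => simp [chainN]
    | cons b t' =>
      simp only [List.length_cons, Nat.add_sub_cancel, List.range_succ_eq_map, List.map_cons,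
        List.map_map, chainN]
      simp only [List.length_cons, Nat.add_sub_cancel] at ih
      rw [← ih]
      simp [Function.comp_def]

theorem pyRange1 (n : Nat) :
    PySem.List.pyRange 1 (n : Int) 1 = (List.range (n - 1)).map (fun k : Nat => (k : Int) + 1) := by
  rw [PySem.List.pyRange_of_pos _ _ (by norm_num)]
  have : (if (1:Int) < (n:Int) then (((n:Int) - 1 + 1 - 1) / 1).toNat else 0) = n - 1 := by
    split <;> omega
  rw [this]
  apply List.map_congr_left
  intro k _
  push_cast
  ring

theorem chain_main (cs : List Char) :
    sp cs = cs.take ((posR cs ++ [cs.length]).headD 0)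
      :: chainN cs (posR cs ++ [cs.length]) := by
  induction cs with
  | nil => simp [sp, posR, chainN]
  | cons c r ih =>
    have hmap : posR (c :: r) ++ [(c :: r).length]
        = (if c = ' ' then [0] else []) ++ (posR r ++ [r.length]).map (· + 1) := by
      simp [posR]
    cases hL : posR r ++ [r.length] with
    | nil => exact absurd hL (by simp)
    | cons l0 lt =>
      rw [hL] at ih
      by_cases hc : c = ' '
      · simp only [sp, if_pos hc, hmap, hL, List.map_cons]
        simp only [if_pos hc, List.cons_append, List.nil_append]
        simp only [chainN]
        rw [show ((l0 + 1) :: lt.map (· + 1)) = ((l0 :: lt).map (· + 1)) by simp]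
        rw [chainN_shift c r (l0 :: lt)]
        rw [ih]
        simp [segN, hL]
      · simp only [sp, if_neg hc, hmap, hL, List.map_cons]
        simp only [if_neg hc, List.nil_append]
        rw [show ((l0 + 1) :: lt.map (· + 1)) = ((l0 :: lt).map (· + 1)) by simp]
        rw [chainN_shift c r (l0 :: lt)]
        rw [ih]
        simp

theorem a_chain (l : String) :
    makelst l = (chainN l.toList (posR l.toList ++ [l.toList.length])).map
      (fun t => String.ofList (cleanCs t)) := by
  unfold makelst
  simp only [getspc_eq, PySem.Str.len_eq]
  set cs := l.toList with hcs
  set ns := posR cs ++ [cs.length] with hns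
  have hspc : (posR cs).map (fun k : Nat => (k : Int)) ++ [(cs.length : Int)]
      = ns.map (fun k : Nat => (k : Int)) := by
    simp [hns, hcs]
  simp only [hspc]
  have hlen : PySem.List.len (ns.map (fun k : Nat => (k : Int))) = (ns.length : Int) := by
    simp [PySem.List.len_eq]
  simp only [hlen, PySem.List.foldl_append_singleton_eq_map, List.nil_append, pyRange1,
    List.map_map]
  rw [← idx_chain cs ns, List.map_map]
  apply List.map_congr_left
  intro k hk
  simp only [Function.comp_apply]
  have h1 : ((k : Int) + 1 - 1) = ((k : Nat) : Int) := by ring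
  rw [h1]
  have h0 : (0 : Int) = ((0 : Nat) : Int) := rfl
  rw [h0, PySem.List.pyGetD_natCast, List.getD_map]
  have h2 : ((k : Int) + 1) = (((k + 1 : Nat)) : Int) := by push_cast; ring
  rw [h2, PySem.List.pyGetD_natCast, List.getD_map]
  have h3 : ((ns.getD k 0 : Nat) : Int) + 1 = (((ns.getD k 0 + 1 : Nat)) : Int) := by
    push_cast; ring
  rw [h3, PySem.List.slice_natCast]
  have : (",[]".toList) = [',', '[', ']'] := by decide
  rw [this]
  simp only [List.foldl_cons, List.foldl_nil]
  rw [replace_single, replace_single, replace_single, clean_filters]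
  rfl

theorem a_char (l : String) :
    makelst l = ((sp l.toList).tail).map (fun t => String.ofList (cleanCs t)) := by
  rw [a_chain, chain_main l.toList]
  simp

theorem b_fold (cs : List Char) : ∀ (out : List String) (cur : List Char),
    (cs.foldl bstep (out, cur)).1 ++ [String.ofList (cs.foldl bstep (out, cur)).2]
    = out ++ String.ofList (cur ++ cleanCs ((sp cs).headD []))
        :: ((sp cs).tail).map (fun t => String.ofList (cleanCs t)) := by
  induction cs with
  | nil => intro out cur; simp [sp, cleanCs]
  | cons c r ih =>
    intro out cur
    simp only [List.foldl_cons]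
    by_cases hc : c = ' '
    · have hb : bstep (out, cur) c = (out ++ [String.ofList cur], []) := by
        simp [bstep, hc]
      rw [hb, ih]
      cases hr : sp r with
      | nil => exact absurd hr (sp_ne_nil r)
      | cons t ts =>
        simp only [sp, if_pos hc, hr]
        simp [cleanCs]
    · by_cases hm : c = ',' ∨ c = '[' ∨ c = ']'
      · have hb : bstep (out, cur) c = (out, cur) := by
          rcases hm with h | h | h <;> simp [bstep, h, hc]
        rw [hb, ih]
        cases hr : sp r with
        | nil => exact absurd hr (sp_ne_nil r)
        | cons t ts =>
          simp only [sp, if_neg hc, hr]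
          have : cleanCs (c :: t) = cleanCs t := by
            rcases hm with h | h | h <;> simp [cleanCs, h]
          simp [this]
      · push_neg at hm
        obtain ⟨h1, h2, h3⟩ := hm
        have hb : bstep (out, cur) c = (out, cur ++ [c]) := by
          simp [bstep, hc, h1, h2, h3]
        rw [hb, ih]
        cases hr : sp r with
        | nil => exact absurd hr (sp_ne_nil r)
        | cons t ts =>
          simp only [sp, if_neg hc, hr]
          have : cleanCs (c :: t) = c :: cleanCs t := by
            simp [cleanCs, h1, h2, h3]
          simp [this]

theorem b_char (l : String) :
    makelst_alt l = ((sp l.toList).tail).map (fun t => String.ofList (cleanCs t)) := by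
  unfold makelst_alt
  simp only [bstep_eq]
  rw [b_fold l.toList [] []]
  simp

-- ===== VERDICT (by name: the statement is the Claim_ definition above) =====
theorem makelst_spec : Claim_equal_makelst := by
  intro l _
  unfold Spec_makelst
  rw [a_char, b_char]
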